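-- pv_equiv track=rewrite | github.com/Yevhen-Yezerskyy/mailer-app | web/panel/aap_audience/views/create_edit_flow_status.py | _first_unmet_dependency
-- ===== SOURCE A (Python) =====
-- from typing import Callable, Mapping, Sequence
--
-- def _first_unmet_dependency(
--     step_key: str,
--     step_definitions: Mapping[str, Mapping[str, object]],
--     completed_keys: set[str],
-- ) -> str:
--     step_def = step_definitions.get(step_key, {})
--     for dep in tuple(step_def.get("depends_on") or ()):
--         if dep in completed_keys:
--             continue
--         nested = _first_unmet_dependency(dep, step_definitions, completed_keys)
--         return nested or dep
--     return ""
-- ===== SOURCE B (Python) =====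
-- def _first_unmet_dependency(step_key, step_definitions, completed_keys):
--     current = step_key
--     result = ""
--     visited = set()
--     while current not in visited:
--         visited.add(current)
--         step_def = step_definitions.get(current, {})
--         nxt = None
--         found = False
--         for dep in tuple(step_def.get("depends_on") or ()):
--             if dep not in completed_keys:
--                 nxt = dep
--                 found = True
--                 break
--         if not found:
--             return result
--         if nxt:
--             result = nxt
--         current = nxt
--     return result
-- ===== Notes on version B (the rewrite author's own statement) =====
-- stated objective: alternative
-- what changed: Replaces A's recursion (one recursive call per chain step, with the 'nested or dep' collapse on the way back up) by an explicit iterative walk that keeps current/result accumulators and a visited set; cyclic inputs, where A raises RecursionError, are excluded by Pre_ (B's visited set makes it terminate there too).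
import Mathlib
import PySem

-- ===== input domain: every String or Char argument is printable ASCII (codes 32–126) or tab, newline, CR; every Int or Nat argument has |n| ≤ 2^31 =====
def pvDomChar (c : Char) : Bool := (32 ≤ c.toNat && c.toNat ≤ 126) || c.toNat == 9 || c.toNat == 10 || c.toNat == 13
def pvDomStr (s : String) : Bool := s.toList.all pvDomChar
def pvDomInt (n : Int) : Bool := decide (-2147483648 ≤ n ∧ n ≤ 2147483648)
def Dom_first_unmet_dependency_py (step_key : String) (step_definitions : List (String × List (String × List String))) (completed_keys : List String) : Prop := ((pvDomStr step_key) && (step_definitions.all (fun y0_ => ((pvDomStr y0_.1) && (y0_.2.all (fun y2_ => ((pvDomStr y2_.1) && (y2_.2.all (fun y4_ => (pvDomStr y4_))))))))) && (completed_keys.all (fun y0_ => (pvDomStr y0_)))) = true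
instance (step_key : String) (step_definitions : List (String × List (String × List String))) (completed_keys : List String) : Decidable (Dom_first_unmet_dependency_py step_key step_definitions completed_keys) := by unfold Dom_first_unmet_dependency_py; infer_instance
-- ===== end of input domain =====

-- B replaces A's recursion by an explicit iterative walk with current/result accumulators and a
-- visited set (alternative decomposition, same cost); on cyclic inputs, where A raises
-- RecursionError (excluded by Pre_), B's visited set detects the cycle and returns a value.

-- shared lookup helper: step_definitions.get(k, {}).get("depends_on") or ()  (dict = assoc list, first match)
def pvDepsOf (sd : List (String × List (String × List String))) (k : String) : List String :=
  PySem.Dict.getD ⟨PySem.Dict.getD ⟨sd⟩ k []⟩ "depends_on" []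

-- ===== PORT A =====
-- A's for-loop over the deps (continue on completed, return on the first unmet dep);
-- `go` is the recursive call of the enclosing function, `nested or dep` is the final if.
def pvALoop (cs : List String) (go : String → String) : List String → String
  | [] => ""
  | dep :: rest =>
    if PySem.Set.contains cs dep then pvALoop cs go rest
    else
      let nested := go dep
      if nested = "" then dep else nested

-- A's recursion, made total with fuel; on every input admitted by Pre_ the recursion depth of the
-- Python is at most step_definitions.length + 2, so the fuel branch is never taken there.
def pvARec (sd : List (String × List (String × List String))) (cs : List String) : Nat → String → String
  | 0, _ => ""
  | n + 1, k => pvALoop cs (pvARec sd cs n) (pvDepsOf sd k)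

def first_unmet_dependency_py (step_key : String) (step_definitions : List (String × List (String × List String))) (completed_keys : List String) : String :=
  pvARec step_definitions completed_keys (step_definitions.length + 2) step_key

-- ===== PORT B =====
-- B's found-flag scan for the first dep not in completed_keys
def pvBScan (cs : List String) : List String → Option String
  | [] => none
  | dep :: rest => if PySem.Set.contains cs dep then pvBScan cs rest else some dep

-- B's while-loop, made total with fuel; because every continuing iteration visits a fresh key of
-- step_definitions, the loop runs at most step_definitions.length + 2 iterations on EVERY input,
-- so this fuel makes the port exact unconditionally.
def pvBLoop (sd : List (String × List (String × List String))) (cs : List String) : Nat → String → String → PySem.Set String → String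
  | 0, _, r, _ => r
  | n + 1, cur, r, vis =>
    if PySem.Set.contains vis cur then r
    else
      let vis' := PySem.Set.add vis cur
      match pvBScan cs (pvDepsOf sd cur) with
      | none => r
      | some d => pvBLoop sd cs n d (if d = "" then r else d) vis'

def first_unmet_dependency_py_alt (step_key : String) (step_definitions : List (String × List (String × List String))) (completed_keys : List String) : String :=
  pvBLoop step_definitions completed_keys (step_definitions.length + 2) step_key "" PySem.Set.empty

-- ===== PRECONDITION & SPEC =====
-- the successor of the chain: the first dep of k not in completed_keys (input data only, no port)
def pvSucc (sd : List (String × List (String × List String))) (cs : List String) (k : String) : Option String :=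
  (pvDepsOf sd k).find? (fun d => !(PySem.Set.contains cs d))

-- number of chain steps from k until a step with no unmet dependency; none = no end within the fuel
def pvSteps (sd : List (String × List (String × List String))) (cs : List String) : Nat → String → Option Nat
  | 0, _ => none
  | n + 1, k =>
    match pvSucc sd cs k with
    | none => some 0
    | some d => (pvSteps sd cs n d).map (· + 1)

-- Pre_ excludes exactly the inputs whose chain of first unmet dependencies cycles: on those the
-- Python A raises RecursionError (it returns no value there), while B returns the last unmet
-- dependency found before the cycle closed. A terminating chain visits pairwise-distinct keys of
-- step_definitions, so it ends within step_definitions.length + 1 steps and pvSteps with this fuel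
-- decides termination exactly; A's termination is a property of the input's dependency graph (the
-- orbit of the first-unmet successor map pvSucc) and has no static shape characterisation, so this
-- graph walk over the input — which computes neither port's output — is the condition itself.
def Pre_first_unmet_dependency_py (step_key : String) (step_definitions : List (String × List (String × List String))) (completed_keys : List String) : Prop :=
  (pvSteps step_definitions completed_keys (step_definitions.length + 2) step_key).isSome = true
instance (step_key : String) (step_definitions : List (String × List (String × List String))) (completed_keys : List String) : Decidable (Pre_first_unmet_dependency_py step_key step_definitions completed_keys) := by unfold Pre_first_unmet_dependency_py; infer_instance

def pvWitness_first_unmet_dependency_py : String × (List (String × List (String × List String))) × List String :=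
  ("a", [("a", [("depends_on", ["b"])])], [])

def Spec_first_unmet_dependency_py (step_key : String) (step_definitions : List (String × List (String × List String))) (completed_keys : List String) (out : String) : Prop := out = first_unmet_dependency_py_alt step_key step_definitions completed_keys
instance (step_key : String) (step_definitions : List (String × List (String × List String))) (completed_keys : List String) (out : String) : Decidable (Spec_first_unmet_dependency_py step_key step_definitions completed_keys out) := by unfold Spec_first_unmet_dependency_py; infer_instance

-- ===== CLAIM (what is proved, stated in full; the proofs are below) =====
def Claim_equal_first_unmet_dependency_py : Prop := ∀ (step_key : String) (step_definitions : List (String × List (String × List String))) (completed_keys : List String), Dom_first_unmet_dependency_py step_key step_definitions completed_keys → Pre_first_unmet_dependency_py step_key step_definitions completed_keys → Spec_first_unmet_dependency_py step_key step_definitions completed_keys (first_unmet_dependency_py step_key step_definitions completed_keys)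


-- ===== LEMMAS AND PROOFS =====

-- the common reference: walk the chain, carrying B's result accumulator
def pvChain (sd : List (String × List (String × List String))) (cs : List String) : Nat → String → String → String
  | 0, _, r => r
  | n + 1, k, r =>
    match pvSucc sd cs k with
    | none => r
    | some d => pvChain sd cs n d (if d = "" then r else d)

theorem pvBScan_eq_find? (cs : List String) (l : List String) :
    pvBScan cs l = l.find? (fun d => !(PySem.Set.contains cs d)) := by
  induction l with
  | nil => rfl
  | cons d rest ih =>
    simp only [pvBScan, List.find?]
    by_cases h : d ∈ cs
    · simp [PySem.Set.contains, h, ih]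
    · simp [PySem.Set.contains, h]

theorem pvALoop_eq (cs : List String) (go : String → String) (l : List String) :
    pvALoop cs go l =
      match l.find? (fun d => !(PySem.Set.contains cs d)) with
      | none => ""
      | some d => if go d = "" then d else go d := by
  induction l with
  | nil => rfl
  | cons d rest ih =>
    simp only [pvALoop, List.find?]
    by_cases h : d ∈ cs
    · simp [PySem.Set.contains, h, ih]
    · simp [PySem.Set.contains, h]

theorem pvChain_ne (sd : List (String × List (String × List String))) (cs : List String) :
    ∀ (n : Nat) (k r : String), r ≠ "" → pvChain sd cs n k r ≠ "" := by
  intro n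
  induction n with
  | zero => intro k r h; simpa [pvChain] using h
  | succ n ih =>
    intro k r h
    simp only [pvChain]
    cases hs : pvSucc sd cs k with
    | none => simpa using h
    | some d =>
      apply ih
      by_cases hd : d = "" <;> simp [hd, h]

theorem pvChain_acc (sd : List (String × List (String × List String))) (cs : List String) :
    ∀ (n : Nat) (k r : String),
      pvChain sd cs n k r = if pvChain sd cs n k "" = "" then r else pvChain sd cs n k "" := by
  intro n
  induction n with
  | zero => intro k r; simp [pvChain]
  | succ n ih =>
    intro k r
    simp only [pvChain]
    cases hs : pvSucc sd cs k with
    | none => simp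
    | some d =>
      by_cases hd : d = ""
      · simpa [hd] using ih d r
      · have hne := pvChain_ne sd cs n d d hd
        simp [hd, hne]

theorem pvARec_eq_chain (sd : List (String × List (String × List String))) (cs : List String) :
    ∀ (n : Nat) (k : String), pvARec sd cs n k = pvChain sd cs n k "" := by
  intro n
  induction n with
  | zero => intro k; rfl
  | succ n ih =>
    intro k
    simp only [pvARec, pvChain]
    rw [pvALoop_eq]
    have hsucc : (pvDepsOf sd k).find? (fun d => !(PySem.Set.contains cs d)) = pvSucc sd cs k := rfl
    rw [hsucc]
    cases hs : pvSucc sd cs k with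
    | none => rfl
    | some d =>
      simp only [ih d]
      by_cases hd : d = ""
      · subst hd
        by_cases h0 : pvChain sd cs n "" "" = "" <;> simp [h0]
      · rw [if_neg hd, pvChain_acc sd cs n d d]

theorem pvSteps_mono (sd : List (String × List (String × List String))) (cs : List String) :
    ∀ (n m : Nat) (k : String) (s : Nat),
      pvSteps sd cs n k = some s → n ≤ m → pvSteps sd cs m k = some s := by
  intro n
  induction n with
  | zero => intro m k s h _; simp [pvSteps] at h
  | succ n ih =>
    intro m k s h hle
    obtain ⟨m', rfl⟩ : ∃ m', m = m' + 1 := ⟨m - 1, by omega⟩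
    simp only [pvSteps] at h ⊢
    cases hs : pvSucc sd cs k with
    | none => simp only [hs] at h ⊢; exact h
    | some d =>
      simp only [hs] at h ⊢
      cases h' : pvSteps sd cs n d with
      | none => simp [h'] at h
      | some t =>
        simp only [h', Option.map_some] at h
        rw [ih m' d t h' (by omega)]
        simpa using h

theorem pvSteps_unique (sd : List (String × List (String × List String))) (cs : List String)
    (n m : Nat) (k : String) (s t : Nat)
    (h₁ : pvSteps sd cs n k = some s) (h₂ : pvSteps sd cs m k = some t) : s = t := by
  rcases le_total n m with h | h
  · have := pvSteps_mono sd cs n m k s h₁ h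
    rw [this] at h₂; exact (Option.some.inj h₂)
  · have := pvSteps_mono sd cs m n k t h₂ h
    rw [this] at h₁; exact (Option.some.inj h₁).symm

theorem pvBLoop_eq_chain (sd : List (String × List (String × List String))) (cs : List String) :
    ∀ (n : Nat) (k r : String) (vis : PySem.Set String) (s : Nat),
      pvSteps sd cs n k = some s →
      (∀ v ∈ vis, ∃ m t, pvSteps sd cs m v = some t ∧ s < t) →
      pvBLoop sd cs n k r vis = pvChain sd cs n k r := by
  intro n
  induction n with
  | zero => intro k r vis s h _; simp [pvSteps] at h
  | succ n ih =>
    intro k r vis s h hvis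
    have hk : ¬ PySem.Set.contains vis k = true := by
      intro hc
      have hmem : k ∈ vis := by
        simpa [PySem.Set.contains] using hc
      obtain ⟨m, t, hm, hlt⟩ := hvis k hmem
      have := pvSteps_unique sd cs (n + 1) m k s t h hm
      omega
    simp only [pvBLoop]
    rw [if_neg hk]
    rw [pvBScan_eq_find?]
    have hsucc : (pvDepsOf sd k).find? (fun d => !(PySem.Set.contains cs d)) = pvSucc sd cs k := rfl
    rw [hsucc]
    simp only [pvChain]
    cases hs : pvSucc sd cs k with
    | none => rfl
    | some d =>
      simp only [pvSteps, hs] at h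
      obtain ⟨s', hs', rfl⟩ : ∃ s', pvSteps sd cs n d = some s' ∧ s = s' + 1 := by
        cases h' : pvSteps sd cs n d with
        | none => simp [h'] at h
        | some t => simp only [h', Option.map_some] at h; exact ⟨t, rfl, (Option.some.inj h).symm⟩
      show pvBLoop sd cs n d (if d = "" then r else d) (PySem.Set.add vis k) =
        pvChain sd cs n d (if d = "" then r else d)
      apply ih d _ _ s' hs'
      intro v hv
      rcases (PySem.Set.mem_add vis k v).mp hv with hv' | rfl
      · obtain ⟨m, t, hm, hlt⟩ := hvis v hv'
        exact ⟨m, t, hm, by omega⟩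
      · exact ⟨n + 1, s' + 1, by simp [pvSteps, hs, hs'], by omega⟩

-- ===== VERDICT (by name: the statement is the Claim_ definition above) =====
theorem first_unmet_dependency_py_spec : Claim_equal_first_unmet_dependency_py := by
  intro step_key sd cs _ hPre
  unfold Spec_first_unmet_dependency_py
  unfold Pre_first_unmet_dependency_py at hPre
  obtain ⟨s, hs⟩ := Option.isSome_iff_exists.mp hPre
  unfold first_unmet_dependency_py first_unmet_dependency_py_alt
  rw [pvARec_eq_chain,
    pvBLoop_eq_chain sd cs (sd.length + 2) step_key "" PySem.Set.empty s hs
      (by intro v hv; simp [PySem.Set.empty] at hv)]
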